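-- pv_equiv track=rewrite | github.com/jofiguero/Implementacion-TCP | Persona1.py | generar_mensaje_enorme
-- ===== SOURCE A (Python) =====
-- def generar_mensaje_enorme(min_size):
--     mensaje = ""
--     while len(mensaje) < min_size:
--         mensaje += "aaaaa"
--         mensaje += "bbbbb"
--         mensaje += "ccccc"
--         mensaje += "ddddd"
--         mensaje += "eeeee"
--         mensaje += "fffff"
--     return mensaje
-- ===== SOURCE B (Python) =====
-- def generar_mensaje_enorme(min_size):
--     if min_size <= 0:
--         return ""
--     n = (min_size + 29) // 30
--     return "aaaaabbbbbcccccdddddeeeeefffff" * n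
-- ===== Notes on version B (the rewrite author's own statement) =====
-- stated objective: faster
-- what changed: Replaces the length-driven while loop of repeated string concatenations with a closed-form ceiling-division count and a single multiplication of the fixed block.
import Mathlib
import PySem

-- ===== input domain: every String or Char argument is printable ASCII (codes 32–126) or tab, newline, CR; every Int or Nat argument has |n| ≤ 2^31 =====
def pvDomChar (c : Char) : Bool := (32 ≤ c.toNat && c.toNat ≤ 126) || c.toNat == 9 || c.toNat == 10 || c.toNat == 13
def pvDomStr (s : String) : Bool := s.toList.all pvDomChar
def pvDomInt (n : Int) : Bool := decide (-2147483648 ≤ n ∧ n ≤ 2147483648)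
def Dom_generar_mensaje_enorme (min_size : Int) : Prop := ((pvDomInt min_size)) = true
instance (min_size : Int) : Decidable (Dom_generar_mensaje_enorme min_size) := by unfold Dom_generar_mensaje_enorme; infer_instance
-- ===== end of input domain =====

-- B replaces A's length-driven while loop of repeated concatenations by a closed-form
-- ceiling-division count plus one replication of the fixed 30-char block (objective: simpler).

-- ===== PORT A =====
-- A's while loop: append the six 5-char chunks while len(mensaje) < min_size.
-- Strings are carried as List Char (ASCII-exact); String.mk at the end.
def pvLoopA (min_size : Int) (mensaje : List Char) : List Char :=
  if (mensaje.length : Int) < min_size then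
    pvLoopA min_size (mensaje ++ "aaaaa".toList ++ "bbbbb".toList ++ "ccccc".toList
      ++ "ddddd".toList ++ "eeeee".toList ++ "fffff".toList)
  else mensaje
termination_by (min_size - mensaje.length).toNat
decreasing_by simp; omega

def generar_mensaje_enorme (min_size : Int) : String :=
  String.mk (pvLoopA min_size [])

-- ===== PORT B =====
def pvBlock : List Char := "aaaaabbbbbcccccdddddeeeeefffff".toList

def generar_mensaje_enorme_alt (min_size : Int) : String :=
  if min_size ≤ 0 then ""
  else String.mk ((List.replicate (PySem.Int.floordiv (min_size + 29) 30).toNat pvBlock).flatten)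

-- ===== PRECONDITION & SPEC =====
def Spec_generar_mensaje_enorme (min_size : Int) (out : String) : Prop := out = generar_mensaje_enorme_alt min_size
instance (min_size : Int) (out : String) : Decidable (Spec_generar_mensaje_enorme min_size out) := by unfold Spec_generar_mensaje_enorme; infer_instance

-- ===== CLAIM (what is proved, stated in full; the proofs are below) =====
def Claim_equal_generar_mensaje_enorme : Prop := ∀ (min_size : Int), Dom_generar_mensaje_enorme min_size → Spec_generar_mensaje_enorme min_size (generar_mensaje_enorme min_size)

-- ===== LEMMAS AND PROOFS =====

-- The loop appends exactly ceil((min_size - len m)/30) copies of the block.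
theorem pvLoopA_aux (min_size : Int) (k : Nat) :
    ∀ m : List Char, (min_size - m.length).toNat ≤ k →
    pvLoopA min_size m
      = m ++ (List.replicate ((min_size - m.length + 29) / 30).toNat pvBlock).flatten := by
  induction k with
  | zero =>
    intro m hk
    rw [pvLoopA]
    have hle : ¬ ((m.length : Int) < min_size) := by omega
    have h0 : ((min_size - m.length + 29) / 30).toNat = 0 := by omega
    simp [hle, h0]
  | succ k ih =>
    intro m hk
    rw [pvLoopA]
    by_cases hlt : (m.length : Int) < min_size
    · simp only [hlt, if_pos]
      set m' := m ++ "aaaaa".toList ++ "bbbbb".toList ++ "ccccc".toList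
        ++ "ddddd".toList ++ "eeeee".toList ++ "fffff".toList with hm'
      have hlen : (m'.length : Int) = m.length + 30 := by
        simp [hm']
      have hrec := ih m' (by omega)
      rw [hrec]
      have hn : ((min_size - m.length + 29) / 30).toNat
          = ((min_size - m'.length + 29) / 30).toNat + 1 := by omega
      rw [hn, List.replicate_succ, List.flatten_cons]
      simp only [hm', pvBlock]
      simp
    · have h0 : ((min_size - m.length + 29) / 30).toNat = 0 := by omega
      simp [hlt, h0]

theorem pvLoopA_eq (min_size : Int) :
    pvLoopA min_size []
      = (List.replicate ((min_size + 29) / 30).toNat pvBlock).flatten := by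
  have h := pvLoopA_aux min_size (min_size - ([] : List Char).length).toNat [] (le_refl _)
  simpa using h

theorem generar_mensaje_enorme_spec : Claim_equal_generar_mensaje_enorme := by
  intro n _
  unfold Spec_generar_mensaje_enorme generar_mensaje_enorme generar_mensaje_enorme_alt
  rw [pvLoopA_eq]
  by_cases h : n ≤ 0
  · have h0 : ((n + 29) / 30).toNat = 0 := by omega
    simp [h, h0]
    rfl
  · rw [PySem.Int.floordiv_eq_ediv_of_pos (by omega : (0:Int) < 30)]
    simp [h]
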